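-- pv_equiv track=rewrite | github.com/yingzhuo1994/AlgoExpert | RectangleMania.py | getCoordsTable
-- ===== SOURCE A (Python) =====
-- def getCoordsTable(coords):
--     coordsTable = {}
--     for coord1 in coords:
--         coord1Directions = {UP: [], RIGHT: [], DOWN: [], LEFT: []}
--         for coord2 in coords:
--             coord2Direction = getCoordDirection(coord1, coord2)
--             if coord2Direction in coord1Directions:
--                 coord1Directions[coord2Direction].append(coord2)
--         coord1String = coordToString(coord1)
--         coordsTable[coord1String] = coord1Directions
--     return coordsTable
--
-- def getCoordDirection(coord1, coord2):
--     x1, y1 = coord1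
--     x2, y2 = coord2
--     if y2 == y1:
--         if x2 > x1:
--             return RIGHT
--         elif x2 < x1:
--             return LEFT
--     elif x2 == x1:
--         if y2 > y1:
--             return UP
--         elif y2 < y1:
--             return DOWN
--     return ""
--
-- def coordToString(coord):
--     x, y = coord
--     return str(x) + "-" + str(y)
--
-- UP = "up"
--
-- RIGHT = "right"
--
-- DOWN = "down"
--
-- LEFT = "left"
-- ===== SOURCE B (Python) =====
-- def getCoordsTable(coords):
--     rows = {}
--     cols = {}
--     for coord in coords:
--         x, y = coord
--         rows.setdefault(y, []).append(coord)
--         cols.setdefault(x, []).append(coord)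
--     coordsTable = {}
--     for coord in coords:
--         x, y = coord
--         row = rows[y]
--         col = cols[x]
--         coordsTable[str(x) + "-" + str(y)] = {
--             "up": [c for c in col if c[1] > y],
--             "right": [c for c in row if c[0] > x],
--             "down": [c for c in col if c[1] < y],
--             "left": [c for c in row if c[0] < x],
--         }
--     return coordsTable
-- ===== Notes on version B (the rewrite author's own statement) =====
-- stated objective: faster
-- what changed: Instead of comparing every pair of coords (nested quadratic scan through getCoordDirection), B groups the coords by row and by column in one pass and builds each coord's up/right/down/left lists by filtering only its own row and column group.
import Mathlib
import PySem

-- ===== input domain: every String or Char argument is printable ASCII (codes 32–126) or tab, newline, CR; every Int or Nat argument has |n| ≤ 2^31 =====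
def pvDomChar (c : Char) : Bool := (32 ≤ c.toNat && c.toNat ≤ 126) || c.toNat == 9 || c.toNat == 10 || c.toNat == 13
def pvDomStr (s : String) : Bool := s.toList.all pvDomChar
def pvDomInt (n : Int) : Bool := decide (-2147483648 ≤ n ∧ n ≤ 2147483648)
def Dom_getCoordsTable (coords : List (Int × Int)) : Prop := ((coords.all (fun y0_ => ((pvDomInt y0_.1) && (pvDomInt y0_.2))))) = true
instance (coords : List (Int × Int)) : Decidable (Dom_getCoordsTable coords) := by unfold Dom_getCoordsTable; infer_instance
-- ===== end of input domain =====

-- B replaces A's all-pairs direction scan by one grouping pass (coords by row and by column)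
-- and per-coord filters of its own row/column group; objective: faster.

-- ===== PORT A =====
def pvUP : String := "up"
def pvRIGHT : String := "right"
def pvDOWN : String := "down"
def pvLEFT : String := "left"

def getCoordDirection (coord1 coord2 : Int × Int) : String :=
  if coord2.2 = coord1.2 then
    if coord2.1 > coord1.1 then pvRIGHT
    else if coord2.1 < coord1.1 then pvLEFT
    else ""
  else if coord2.1 = coord1.1 then
    if coord2.2 > coord1.2 then pvUP
    else if coord2.2 < coord1.2 then pvDOWN
    else ""
  else ""

def coordToString (coord : Int × Int) : String :=
  PySem.Int.toStr coord.1 ++ "-" ++ PySem.Int.toStr coord.2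

def getCoordsTable (coords : List (Int × Int)) : List (String × List (String × List (Int × Int))) :=
  let coordsTable : PySem.Dict String (PySem.Dict String (List (Int × Int))) :=
    coords.foldl (fun table coord1 =>
      let init : PySem.Dict String (List (Int × Int)) :=
        PySem.Dict.ofList [(pvUP, []), (pvRIGHT, []), (pvDOWN, []), (pvLEFT, [])]
      let coord1Directions := coords.foldl (fun dirs coord2 =>
        let coord2Direction := getCoordDirection coord1 coord2
        if dirs.contains coord2Direction then
          dirs.modify coord2Direction [] (fun l => l ++ [coord2])
        else dirs) init
      table.insert (coordToString coord1) coord1Directions) PySem.Dict.empty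
  -- the Python returns a dict of dicts; under the type convention both layers are assoc lists
  coordsTable.items.map (fun p => (p.1, p.2.items))

-- ===== PORT B =====
def getCoordsTable_alt (coords : List (Int × Int)) : List (String × List (String × List (Int × Int))) :=
  let rc : PySem.Dict Int (List (Int × Int)) × PySem.Dict Int (List (Int × Int)) :=
    coords.foldl (fun rc coord =>
      (rc.1.modify coord.2 [] (fun l => l ++ [coord]),
       rc.2.modify coord.1 [] (fun l => l ++ [coord])))
      (PySem.Dict.empty, PySem.Dict.empty)
  let rows := rc.1
  let cols := rc.2
  let coordsTable : PySem.Dict String (List (String × List (Int × Int))) :=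
    coords.foldl (fun table coord =>
      let row := rows.getD coord.2 []
      let col := cols.getD coord.1 []
      table.insert (PySem.Int.toStr coord.1 ++ "-" ++ PySem.Int.toStr coord.2)
        [("up", col.filter (fun c => c.2 > coord.2)),
         ("right", row.filter (fun c => c.1 > coord.1)),
         ("down", col.filter (fun c => c.2 < coord.2)),
         ("left", row.filter (fun c => c.1 < coord.1))]) PySem.Dict.empty
  coordsTable.items

-- ===== PRECONDITION & SPEC =====
def Spec_getCoordsTable (coords : List (Int × Int)) (out : List (String × List (String × List (Int × Int)))) : Prop := out = getCoordsTable_alt coords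
instance (coords : List (Int × Int)) (out : List (String × List (String × List (Int × Int)))) : Decidable (Spec_getCoordsTable coords out) := by unfold Spec_getCoordsTable; infer_instance

-- ===== CLAIM (what is proved, stated in full; the proofs are below) =====
def Claim_equal_getCoordsTable : Prop := ∀ (coords : List (Int × Int)), Dom_getCoordsTable coords → Spec_getCoordsTable coords (getCoordsTable coords)

-- ===== LEMMAS AND PROOFS =====

-- A's four direction lists for one coord, as filters of the whole coordinate list
def pvDirsA (coords : List (Int × Int)) (c1 : Int × Int) : PySem.Dict String (List (Int × Int)) :=
  PySem.Dict.mk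
    [(pvUP, coords.filter (fun c2 => decide (c2.1 = c1.1 ∧ c1.2 < c2.2))),
     (pvRIGHT, coords.filter (fun c2 => decide (c2.2 = c1.2 ∧ c1.1 < c2.1))),
     (pvDOWN, coords.filter (fun c2 => decide (c2.1 = c1.1 ∧ c2.2 < c1.2))),
     (pvLEFT, coords.filter (fun c2 => decide (c2.2 = c1.2 ∧ c2.1 < c1.1)))]

-- B's value for one coord, with the row/column groups written out as filters
def pvValB (coords : List (Int × Int)) (c : Int × Int) : List (String × List (Int × Int)) :=
  [("up", (coords.filter (fun q => q.1 == c.1)).filter (fun q => q.2 > c.2)),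
   ("right", (coords.filter (fun q => q.2 == c.2)).filter (fun q => q.1 > c.1)),
   ("down", (coords.filter (fun q => q.1 == c.1)).filter (fun q => q.2 < c.2)),
   ("left", (coords.filter (fun q => q.2 == c.2)).filter (fun q => q.1 < c.1))]

theorem stepA_eq (c1 c2 : Int × Int) (u r d l : List (Int × Int)) :
    (let coord2Direction := getCoordDirection c1 c2
     if (PySem.Dict.mk [(pvUP, u), (pvRIGHT, r), (pvDOWN, d), (pvLEFT, l)]).contains coord2Direction then
       (PySem.Dict.mk [(pvUP, u), (pvRIGHT, r), (pvDOWN, d), (pvLEFT, l)]).modify coord2Direction []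
         (fun t => t ++ [c2])
     else PySem.Dict.mk [(pvUP, u), (pvRIGHT, r), (pvDOWN, d), (pvLEFT, l)]) =
    PySem.Dict.mk
      [(pvUP, u ++ if c2.1 = c1.1 ∧ c1.2 < c2.2 then [c2] else []),
       (pvRIGHT, r ++ if c2.2 = c1.2 ∧ c1.1 < c2.1 then [c2] else []),
       (pvDOWN, d ++ if c2.1 = c1.1 ∧ c2.2 < c1.2 then [c2] else []),
       (pvLEFT, l ++ if c2.2 = c1.2 ∧ c2.1 < c1.1 then [c2] else [])] := by
  by_cases hy : c2.2 = c1.2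
  · by_cases hx : c2.1 > c1.1
    · have hdir : getCoordDirection c1 c2 = pvRIGHT := by simp [getCoordDirection, hy, hx]
      have hU : ¬(c2.1 = c1.1 ∧ c1.2 < c2.2) := by omega
      have hD : ¬(c2.1 = c1.1 ∧ c2.2 < c1.2) := by omega
      have hL : ¬(c2.2 = c1.2 ∧ c2.1 < c1.1) := by omega
      have hR : c2.2 = c1.2 ∧ c1.1 < c2.1 := ⟨hy, hx⟩
      simp only [hdir]
      simp [PySem.Dict.modify, PySem.Dict.insert, PySem.Dict.contains, PySem.Dict.getD,
        PySem.Dict.get?, pvUP, pvRIGHT, pvDOWN, pvLEFT, hU, hD, hL, hR] <;> omega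
    · by_cases hx2 : c2.1 < c1.1
      · have hdir : getCoordDirection c1 c2 = pvLEFT := by simp [getCoordDirection, hy, hx, hx2]
        have hU : ¬(c2.1 = c1.1 ∧ c1.2 < c2.2) := by omega
        have hD : ¬(c2.1 = c1.1 ∧ c2.2 < c1.2) := by omega
        have hR : ¬(c2.2 = c1.2 ∧ c1.1 < c2.1) := by omega
        have hL : c2.2 = c1.2 ∧ c2.1 < c1.1 := ⟨hy, hx2⟩
        simp only [hdir]
        simp [PySem.Dict.modify, PySem.Dict.insert, PySem.Dict.contains, PySem.Dict.getD,
          PySem.Dict.get?, pvUP, pvRIGHT, pvDOWN, pvLEFT, hU, hD, hR, hL] <;> omega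
      · have hdir : getCoordDirection c1 c2 = "" := by simp [getCoordDirection, hy, hx, hx2]
        have hU : ¬(c2.1 = c1.1 ∧ c1.2 < c2.2) := by omega
        have hD : ¬(c2.1 = c1.1 ∧ c2.2 < c1.2) := by omega
        have hR : ¬(c2.2 = c1.2 ∧ c1.1 < c2.1) := by omega
        have hL : ¬(c2.2 = c1.2 ∧ c2.1 < c1.1) := by omega
        simp only [hdir]
        simp [PySem.Dict.contains, pvUP, pvRIGHT, pvDOWN, pvLEFT, hU, hD, hR, hL]
  · by_cases hx : c2.1 = c1.1
    · by_cases hy2 : c2.2 > c1.2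
      · have hdir : getCoordDirection c1 c2 = pvUP := by simp [getCoordDirection, hy, hx, hy2]
        have hD : ¬(c2.1 = c1.1 ∧ c2.2 < c1.2) := by omega
        have hR : ¬(c2.2 = c1.2 ∧ c1.1 < c2.1) := by omega
        have hL : ¬(c2.2 = c1.2 ∧ c2.1 < c1.1) := by omega
        have hU : c2.1 = c1.1 ∧ c1.2 < c2.2 := ⟨hx, hy2⟩
        simp only [hdir]
        simp [PySem.Dict.modify, PySem.Dict.insert, PySem.Dict.contains, PySem.Dict.getD,
          PySem.Dict.get?, pvUP, pvRIGHT, pvDOWN, pvLEFT, hD, hR, hL, hU] <;> omega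
      · have hlt : c2.2 < c1.2 := by omega
        have hdir : getCoordDirection c1 c2 = pvDOWN := by
          simp [getCoordDirection, hy, hx, hy2, hlt]
        have hU : ¬(c2.1 = c1.1 ∧ c1.2 < c2.2) := by omega
        have hR : ¬(c2.2 = c1.2 ∧ c1.1 < c2.1) := by omega
        have hL : ¬(c2.2 = c1.2 ∧ c2.1 < c1.1) := by omega
        have hD : c2.1 = c1.1 ∧ c2.2 < c1.2 := ⟨hx, hlt⟩
        simp only [hdir]
        simp [PySem.Dict.modify, PySem.Dict.insert, PySem.Dict.contains, PySem.Dict.getD,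
          PySem.Dict.get?, pvUP, pvRIGHT, pvDOWN, pvLEFT, hU, hR, hL, hD] <;> omega
    · have hdir : getCoordDirection c1 c2 = "" := by simp [getCoordDirection, hy, hx]
      have hU : ¬(c2.1 = c1.1 ∧ c1.2 < c2.2) := by omega
      have hD : ¬(c2.1 = c1.1 ∧ c2.2 < c1.2) := by omega
      have hR : ¬(c2.2 = c1.2 ∧ c1.1 < c2.1) := by omega
      have hL : ¬(c2.2 = c1.2 ∧ c2.1 < c1.1) := by omega
      simp only [hdir]
      simp [PySem.Dict.contains, pvUP, pvRIGHT, pvDOWN, pvLEFT, hU, hD, hR, hL]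

theorem append_if_filter {α : Type} (c : α) (cs : List α) (w : List α) (P : Prop) [Decidable P]
    (p : α → Bool) (hp : p c = true ↔ P) :
    (w ++ if P then [c] else []) ++ cs.filter p = w ++ (c :: cs).filter p := by
  rw [List.filter_cons]
  by_cases h : P
  · simp [h, hp.mpr h, List.append_assoc]
  · have hf : p c = false := by
      rw [← Bool.not_eq_true]; exact fun hc => h (hp.mp hc)
    simp [h, hf, List.append_assoc]

theorem foldA_eq (c1 : Int × Int) (coords : List (Int × Int)) :
    ∀ u r d l : List (Int × Int),
    coords.foldl (fun dirs c2 =>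
        let coord2Direction := getCoordDirection c1 c2
        if dirs.contains coord2Direction then
          dirs.modify coord2Direction [] (fun t => t ++ [c2]) else dirs)
      (PySem.Dict.mk [(pvUP, u), (pvRIGHT, r), (pvDOWN, d), (pvLEFT, l)]) =
    PySem.Dict.mk
      [(pvUP, u ++ coords.filter (fun c2 => decide (c2.1 = c1.1 ∧ c1.2 < c2.2))),
       (pvRIGHT, r ++ coords.filter (fun c2 => decide (c2.2 = c1.2 ∧ c1.1 < c2.1))),
       (pvDOWN, d ++ coords.filter (fun c2 => decide (c2.1 = c1.1 ∧ c2.2 < c1.2))),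
       (pvLEFT, l ++ coords.filter (fun c2 => decide (c2.2 = c1.2 ∧ c2.1 < c1.1)))] := by
  induction coords with
  | nil => intro u r d l; simp
  | cons c cs ih =>
    intro u r d l
    rw [List.foldl_cons, stepA_eq c1 c u r d l, ih]
    rw [append_if_filter c cs u (c.1 = c1.1 ∧ c1.2 < c.2)
          (fun c2 => decide (c2.1 = c1.1 ∧ c1.2 < c2.2)) (by simp),
        append_if_filter c cs r (c.2 = c1.2 ∧ c1.1 < c.1)
          (fun c2 => decide (c2.2 = c1.2 ∧ c1.1 < c2.1)) (by simp),
        append_if_filter c cs d (c.1 = c1.1 ∧ c.2 < c1.2)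
          (fun c2 => decide (c2.1 = c1.1 ∧ c2.2 < c1.2)) (by simp),
        append_if_filter c cs l (c.2 = c1.2 ∧ c.1 < c1.1)
          (fun c2 => decide (c2.2 = c1.2 ∧ c2.1 < c1.1)) (by simp)]

theorem rows_getD (coords : List (Int × Int)) (y : Int) :
    (coords.foldl (fun d (c : Int × Int) => d.modify c.2 [] (fun t => t ++ [c]))
      (PySem.Dict.empty : PySem.Dict Int (List (Int × Int)))).getD y [] =
    coords.filter (fun c => c.2 == y) := by
  rw [show (fun d (c : Int × Int) => d.modify c.2 [] (fun t => t ++ [c])) =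
      (fun (d : PySem.Dict Int (List (Int × Int))) (c : Int × Int) =>
        (fun d (p : Int × (Int × Int)) => d.modify p.1 [] (fun t => t ++ [p.2])) d
          ((fun c : Int × Int => (c.2, c)) c)) from rfl,
    ← List.foldl_map (f := fun c : Int × Int => (c.2, c))
      (g := fun (d : PySem.Dict Int (List (Int × Int))) (p : Int × (Int × Int)) =>
        d.modify p.1 [] (fun t => t ++ [p.2])),
    PySem.Dict.getD_foldl_modify_append]
  simp [List.filter_map, List.map_map, Function.comp_def]

theorem cols_getD (coords : List (Int × Int)) (x : Int) :
    (coords.foldl (fun d (c : Int × Int) => d.modify c.1 [] (fun t => t ++ [c]))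
      (PySem.Dict.empty : PySem.Dict Int (List (Int × Int)))).getD x [] =
    coords.filter (fun c => c.1 == x) := by
  rw [show (fun d (c : Int × Int) => d.modify c.1 [] (fun t => t ++ [c])) =
      (fun (d : PySem.Dict Int (List (Int × Int))) (c : Int × Int) =>
        (fun d (p : Int × (Int × Int)) => d.modify p.1 [] (fun t => t ++ [p.2])) d
          ((fun c : Int × Int => (c.1, c)) c)) from rfl,
    ← List.foldl_map (f := fun c : Int × Int => (c.1, c))
      (g := fun (d : PySem.Dict Int (List (Int × Int))) (p : Int × (Int × Int)) =>
        d.modify p.1 [] (fun t => t ++ [p.2])),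
    PySem.Dict.getD_foldl_modify_append]
  simp [List.filter_map, List.map_map, Function.comp_def]

theorem insert_map_conv (tA : PySem.Dict String (PySem.Dict String (List (Int × Int))))
    (k : String) (v : PySem.Dict String (List (Int × Int))) :
    PySem.Dict.mk (((tA.insert k v).items).map (fun p => (p.1, p.2.items))) =
    (PySem.Dict.mk ((tA.items).map (fun p => (p.1, p.2.items)))).insert k v.items := by
  have hc : (PySem.Dict.mk ((tA.items).map (fun p => (p.1, p.2.items)))).contains k
      = tA.contains k := by
    simp [PySem.Dict.contains, List.any_map, Function.comp_def]
  apply PySem.Dict.ext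
  simp only [PySem.Dict.items_insert, hc]
  split_ifs with h
  · simp only [List.map_map]
    apply List.map_congr_left
    intro p _
    by_cases hp : p.1 = k <;> simp [hp, Function.comp_def]
  · simp

theorem outer_fold (key : (Int × Int) → String)
    (vA : (Int × Int) → PySem.Dict String (List (Int × Int)))
    (vB : (Int × Int) → List (String × List (Int × Int)))
    (hv : ∀ c, (vA c).items = vB c) (coords : List (Int × Int)) :
    ∀ tA : PySem.Dict String (PySem.Dict String (List (Int × Int))),
    ((coords.foldl (fun t c => t.insert (key c) (vA c)) tA).items).map (fun p => (p.1, p.2.items)) =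
    (coords.foldl (fun t c => t.insert (key c) (vB c))
      (PySem.Dict.mk ((tA.items).map (fun p => (p.1, p.2.items))))).items := by
  induction coords with
  | nil => intro tA; rfl
  | cons c cs ih =>
    intro tA
    rw [List.foldl_cons, List.foldl_cons, ih, insert_map_conv, hv]

theorem dirsA_items (coords : List (Int × Int)) (c : Int × Int) :
    (pvDirsA coords c).items = pvValB coords c := by
  unfold pvDirsA pvValB
  simp only [PySem.Dict.items, List.filter_filter]
  refine congrArg₂ _ (congrArg _ ?_) (congrArg₂ _ (congrArg _ ?_)
    (congrArg₂ _ (congrArg _ ?_) (congrArg₂ _ (congrArg _ ?_) rfl))) <;>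
  · apply List.filter_congr
    intro a _
    by_cases h1 : a.1 = c.1 <;> by_cases h2 : a.2 = c.2 <;>
      by_cases h3 : c.2 < a.2 <;> by_cases h4 : c.1 < a.1 <;> simp_all <;> omega

theorem hA_eq (coords : List (Int × Int)) :
    getCoordsTable coords =
    ((coords.foldl (fun t c1 => t.insert (coordToString c1) (pvDirsA coords c1))
      PySem.Dict.empty).items).map (fun p => (p.1, p.2.items)) := by
  unfold getCoordsTable
  have h0 : (PySem.Dict.ofList [(pvUP, ([] : List (Int × Int))), (pvRIGHT, []), (pvDOWN, []), (pvLEFT, [])]) =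
      PySem.Dict.mk [(pvUP, []), (pvRIGHT, []), (pvDOWN, []), (pvLEFT, [])] := by decide
  have hstep : (fun (table : PySem.Dict String (PySem.Dict String (List (Int × Int)))) coord1 =>
      let init : PySem.Dict String (List (Int × Int)) :=
        PySem.Dict.ofList [(pvUP, []), (pvRIGHT, []), (pvDOWN, []), (pvLEFT, [])]
      let coord1Directions := coords.foldl (fun dirs coord2 =>
        let coord2Direction := getCoordDirection coord1 coord2
        if dirs.contains coord2Direction then
          dirs.modify coord2Direction [] (fun l => l ++ [coord2])
        else dirs) init
      table.insert (coordToString coord1) coord1Directions) =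
      (fun t c1 => t.insert (coordToString c1) (pvDirsA coords c1)) := by
    funext t c1
    show t.insert (coordToString c1) _ = _
    congr 1
    rw [h0, foldA_eq]
    simp [pvDirsA]
  rw [hstep]

theorem hB_eq (coords : List (Int × Int)) :
    getCoordsTable_alt coords =
    (coords.foldl (fun t c => t.insert (coordToString c) (pvValB coords c))
      PySem.Dict.empty).items := by
  unfold getCoordsTable_alt
  have hrc : (coords.foldl (fun rc (coord : Int × Int) =>
      (rc.1.modify coord.2 [] (fun l => l ++ [coord]),
       rc.2.modify coord.1 [] (fun l => l ++ [coord])))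
      ((PySem.Dict.empty, PySem.Dict.empty) :
        PySem.Dict Int (List (Int × Int)) × PySem.Dict Int (List (Int × Int)))) =
      (coords.foldl (fun d (c : Int × Int) => d.modify c.2 [] (fun t => t ++ [c])) PySem.Dict.empty,
       coords.foldl (fun d (c : Int × Int) => d.modify c.1 [] (fun t => t ++ [c])) PySem.Dict.empty) :=
    PySem.List.foldl_prod_mk
      (fun d (c : Int × Int) => d.modify c.2 [] (fun t => t ++ [c]))
      (fun d (c : Int × Int) => d.modify c.1 [] (fun t => t ++ [c])) coords
      PySem.Dict.empty PySem.Dict.empty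
  rw [hrc]
  simp only [rows_getD, cols_getD]
  rfl

-- ===== VERDICT (by name: the statement is the Claim_ definition above) =====
theorem getCoordsTable_spec : Claim_equal_getCoordsTable := by
  intro coords _
  show getCoordsTable coords = getCoordsTable_alt coords
  rw [hA_eq, hB_eq]
  have h := outer_fold coordToString (pvDirsA coords) (pvValB coords)
    (dirsA_items coords) coords PySem.Dict.empty
  simpa using h
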